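-- pv_equiv track=rewrite | github.com/DeeproChoudhury/AutoNLGProver | extract.py | integrate_lemmas_into_proof
-- ===== SOURCE A (Python) =====
-- def integrate_lemmas_into_proof(text):
--     lines = text.split('\n')
--
--     in_helper_lemmas = False
--     in_proof_section = False
--
--     lemmas = []
--     proof = []
--
--     current_lemma = []
--
--     for line in lines:
--         stripped_line = line.strip()
--
--         if stripped_line.startswith('## Helper Lemmas'):
--             in_helper_lemmas = True
--             in_proof_section = False
--             continue
--         elif stripped_line.startswith('## Proof'):
--             in_helper_lemmas = False
--             in_proof_section = True
--             proof.append(line)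
--             continue
--
--         if in_helper_lemmas:
--             if stripped_line == '':
--                 if current_lemma:
--                     lemmas.append('\n'.join(current_lemma))
--                     current_lemma = []
--             else:
--                 current_lemma.append(line)
--         elif in_proof_section:
--             proof.append(line)
--
--     if current_lemma:
--         lemmas.append('\n'.join(current_lemma))
--
--     lemmas_not_in_proof = []
--     proof_text = '\n'.join(proof)
--     for lemma in lemmas:
--         lemma_statement = lemma.strip().split('\n')[0]
--         if lemma_statement not in proof_text:
--             lemmas_not_in_proof.append(lemma)
--
--     if lemmas_not_in_proof:
--         for idx, line in enumerate(proof):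
--             if line.strip().startswith('theorem'):
--                 theorem_idx = idx
--                 break
--         else:
--             theorem_idx = len(proof)
--
--         proof_with_lemmas = proof[:theorem_idx] + [''] + lemmas_not_in_proof + [''] + proof[theorem_idx:]
--     else:
--         proof_with_lemmas = proof
--
--     new_text = '\n'.join(proof_with_lemmas)
--     return new_text
-- ===== SOURCE B (Python) =====
-- def integrate_lemmas_into_proof(text):
--     # Reverse traversal: no mode flags; lines are batched into `pending` and the
--     # whole batch is routed to its section when its governing header is reached.
--     helper, proof, pending = [], [], []
--     for line in reversed(text.split('\n')):
--         s = line.strip()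
--         if s.startswith('## Helper Lemmas'):
--             helper = pending + helper
--             pending = []
--         elif s.startswith('## Proof'):
--             proof = [line] + pending + proof
--             pending = []
--         else:
--             pending = [line] + pending
--     # lines before the first header (left in `pending`) belong to no section
--     lemmas, block = [], []
--     for ln in reversed(helper):
--         if ln.strip() != '':
--             block = [ln] + block
--         elif block:
--             lemmas = ['\n'.join(block)] + lemmas
--             block = []
--     if block:
--         lemmas = ['\n'.join(block)] + lemmas
--     proof_text = '\n'.join(proof)
--     missing = [lm for lm in lemmas if lm.strip().split('\n')[0] not in proof_text]
--     if not missing: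
--         return proof_text
--     t = next((i for i, ln in enumerate(proof) if ln.strip().startswith('theorem')),
--              len(proof))
--     return '\n'.join(proof[:t] + [''] + missing + [''] + proof[t:])
-- ===== Notes on version B (the rewrite author's own statement) =====
-- stated objective: alternative
-- what changed: Replaced A's forward scan with two boolean mode flags and incremental appends by a reverse (back-to-front) traversal that keeps no mode state: lines are batched into a pending list and the whole batch is routed to its section when its governing header is reached, and lemma blocks are likewise built back-to-front with a leading flush instead of A's trailing flush.
import Mathlib
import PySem

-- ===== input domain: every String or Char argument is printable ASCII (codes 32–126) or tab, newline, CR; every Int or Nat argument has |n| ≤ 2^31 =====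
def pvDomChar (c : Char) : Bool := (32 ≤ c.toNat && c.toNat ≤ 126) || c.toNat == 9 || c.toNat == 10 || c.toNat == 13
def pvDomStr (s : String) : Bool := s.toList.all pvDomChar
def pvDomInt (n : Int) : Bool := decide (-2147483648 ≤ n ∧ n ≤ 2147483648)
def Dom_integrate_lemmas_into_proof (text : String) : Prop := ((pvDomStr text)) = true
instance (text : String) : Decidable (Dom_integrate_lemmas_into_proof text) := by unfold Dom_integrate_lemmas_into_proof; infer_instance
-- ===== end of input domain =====

-- B replaces A's forward mode-flag scan by a reverse traversal with a pending batch (and a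
-- leading instead of trailing lemma-block flush); same cost, genuinely different traversal.

-- ===== PORT A =====
-- s.split('\n') (sep non-empty, so Python's str.split = splitOn); used by both ports
def pvSplitNL (s : String) : List String :=
  (PySem.Chars.splitOn s.toList ['\n']).map String.ofList

-- the for-line loop of A: state (in_helper_lemmas, in_proof_section, lemmas, proof, current_lemma)
def pvALoop : List String → Bool → Bool → List String → List String → List String →
    (List String × List String × List String)
  | [], _, _, lemmas, proof, cur => (lemmas, proof, cur)
  | line :: rest, inH, inP, lemmas, proof, cur =>
    let s := PySem.Str.strip line
    if PySem.Str.startswith s "## Helper Lemmas" then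
      pvALoop rest true false lemmas proof cur
    else if PySem.Str.startswith s "## Proof" then
      pvALoop rest false true lemmas (proof ++ [line]) cur
    else if inH then
      if s = "" then
        if cur ≠ [] then pvALoop rest inH inP (lemmas ++ [PySem.Str.join "\n" cur]) proof []
        else pvALoop rest inH inP lemmas proof cur
      else pvALoop rest inH inP lemmas proof (cur ++ [line])
    else if inP then
      pvALoop rest inH inP lemmas (proof ++ [line]) cur
    else
      pvALoop rest inH inP lemmas proof cur

-- the 'for lemma in lemmas' filter loop of A
def pvAFilter : List String → String → List String → List String
  | [], _, acc => acc
  | lm :: rest, proofText, acc =>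
    let stmt := (pvSplitNL (PySem.Str.strip lm)).headD ""
    if ¬ (PySem.Str.isIn stmt proofText = true) then
      pvAFilter rest proofText (acc ++ [lm])
    else
      pvAFilter rest proofText acc

-- the 'for idx, line in enumerate(proof)' with break/else of A
def pvAFindTheorem : List String → Nat
  | [] => 0
  | line :: rest =>
    if PySem.Str.startswith (PySem.Str.strip line) "theorem" then 0
    else pvAFindTheorem rest + 1

def integrate_lemmas_into_proof (text : String) : String :=
  let lines := pvSplitNL text
  let (lemmas0, proof, cur) := pvALoop lines false false [] [] []
  let lemmas := if cur ≠ [] then lemmas0 ++ [PySem.Str.join "\n" cur] else lemmas0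
  let proofText := PySem.Str.join "\n" proof
  let lemmasNotInProof := pvAFilter lemmas proofText []
  let proofWithLemmas :=
    if lemmasNotInProof ≠ [] then
      let theoremIdx := pvAFindTheorem proof
      proof.take theoremIdx ++ [""] ++ lemmasNotInProof ++ [""] ++ proof.drop theoremIdx
    else proof
  PySem.Str.join "\n" proofWithLemmas

-- ===== PORT B =====
-- B's 'for line in reversed(lines)' with state (helper, proof, pending): a right-to-left
-- traversal, i.e. structural recursion that processes the head AFTER the tail's result.
def pvBScan : List String → List String × List String × List String
  | [] => ([], [], [])
  | line :: rest =>
    let st := pvBScan rest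
    let s := PySem.Str.strip line
    if PySem.Str.startswith s "## Helper Lemmas" then (st.2.2 ++ st.1, st.2.1, [])
    else if PySem.Str.startswith s "## Proof" then (st.1, line :: (st.2.2 ++ st.2.1), [])
    else (st.1, st.2.1, line :: st.2.2)

-- B's 'for ln in reversed(helper)' with state (lemmas, block), built back-to-front
def pvBBlk : List String → List String × List String
  | [] => ([], [])
  | ln :: rest =>
    let st := pvBBlk rest
    if PySem.Str.strip ln ≠ "" then (st.1, ln :: st.2)
    else if st.2 ≠ [] then (PySem.Str.join "\n" st.2 :: st.1, [])
    else st

def integrate_lemmas_into_proof_alt (text : String) : String :=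
  let st := pvBScan (pvSplitNL text)
  let helper := st.1
  let proof := st.2.1
  let bl := pvBBlk helper
  let lemmas := if bl.2 ≠ [] then PySem.Str.join "\n" bl.2 :: bl.1 else bl.1
  let proofText := PySem.Str.join "\n" proof
  let missing := lemmas.filter
    (fun lm => !(PySem.Str.isIn ((pvSplitNL (PySem.Str.strip lm)).headD "") proofText))
  if missing = [] then proofText
  else
    let t := proof.findIdx (fun ln => PySem.Str.startswith (PySem.Str.strip ln) "theorem")
    PySem.Str.join "\n" (proof.take t ++ [""] ++ missing ++ [""] ++ proof.drop t)

-- ===== PRECONDITION & SPEC =====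
def Spec_integrate_lemmas_into_proof (text : String) (out : String) : Prop := out = integrate_lemmas_into_proof_alt text
instance (text : String) (out : String) : Decidable (Spec_integrate_lemmas_into_proof text out) := by unfold Spec_integrate_lemmas_into_proof; infer_instance

-- ===== CLAIM (what is proved, stated in full; the proofs are below) =====
def Claim_equal_integrate_lemmas_into_proof : Prop := ∀ (text : String), Dom_integrate_lemmas_into_proof text → Spec_integrate_lemmas_into_proof text (integrate_lemmas_into_proof text)

-- ===== LEMMAS AND PROOFS =====

-- proof-only intermediate spec: tag each line with its governing mode (0 none, 1 helper, 2 proof)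
def pvBTag : List String → Nat → List (Nat × String)
  | [], _ => []
  | line :: rest, mode =>
    let s := PySem.Str.strip line
    if PySem.Str.startswith s "## Helper Lemmas" then pvBTag rest 1
    else if PySem.Str.startswith s "## Proof" then (2, line) :: pvBTag rest 2
    else (mode, line) :: pvBTag rest mode

def pvHelpers (t : List (Nat × String)) : List String :=
  (t.filter (fun p => p.1 == 1)).map (fun p => p.2)

def pvProofs (t : List (Nat × String)) : List String :=
  (t.filter (fun p => p.1 == 2)).map (fun p => p.2)

-- forward blank-line block splitting: completed blocks / pending block
def pvSplitAux : List String → List String → (List String × List String)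
  | [], block => ([], block)
  | ln :: rest, block =>
    if PySem.Str.strip ln ≠ "" then pvSplitAux rest (block ++ [ln])
    else if block ≠ [] then
      let r := pvSplitAux rest []
      (PySem.Str.join "\n" block :: r.1, r.2)
    else pvSplitAux rest block

def pvMode (inH inP : Bool) : Nat := if inH then 1 else if inP then 2 else 0

theorem pvALoop_eq (lines : List String) : ∀ (inH inP : Bool) (L P C : List String),
    pvALoop lines inH inP L P C =
      (L ++ (pvSplitAux (pvHelpers (pvBTag lines (pvMode inH inP))) C).1,
       P ++ pvProofs (pvBTag lines (pvMode inH inP)),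
       (pvSplitAux (pvHelpers (pvBTag lines (pvMode inH inP))) C).2) := by
  induction lines with
  | nil => intro inH inP L P C; simp [pvALoop, pvBTag, pvHelpers, pvProofs, pvSplitAux]
  | cons line rest ih =>
    intro inH inP L P C
    simp only [pvALoop, pvBTag]
    by_cases h1 : PySem.Str.startswith (PySem.Str.strip line) "## Helper Lemmas" = true
    · simp only [h1, if_true]
      rw [ih true false L P C]
      simp [pvMode]
    · by_cases h2 : PySem.Str.startswith (PySem.Str.strip line) "## Proof" = true
      · simp only [h1, h2, if_true]
        rw [ih false true L (P ++ [line]) C]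
        simp [pvMode, pvProofs, pvHelpers]
      · simp only [h1, h2]
        by_cases hH : inH
        · subst hH
          by_cases hs : PySem.Str.strip line = ""
          · by_cases hc : C ≠ []
            · simp only [hs]
              rw [ih true inP (L ++ [PySem.Str.join "\n" C]) P []]
              simp [pvMode, pvHelpers, pvProofs, pvSplitAux, hs, hc]
            · simp only [hs, if_true]
              rw [ih true inP L P C]
              simp [pvMode, pvHelpers, pvProofs, pvSplitAux, hs, hc]
          · simp only [hs]
            rw [ih true inP L P (C ++ [line])]
            simp [pvMode, pvHelpers, pvProofs, pvSplitAux, hs]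
        · by_cases hP : inP
          · simp only [hH, hP]
            rw [ih false true L (P ++ [line]) C]
            simp [pvMode, pvHelpers, pvProofs]
          · simp only [hH, hP]
            rw [ih false false L P C]
            simp [pvMode, pvHelpers, pvProofs]

-- B's reverse scan computes the tagged sections: pending = lines before the first header
theorem pvBScan_eq (lines : List String) : ∀ (m : Nat),
    pvHelpers (pvBTag lines m) =
        (if m = 1 then (pvBScan lines).2.2 else []) ++ (pvBScan lines).1 ∧
    pvProofs (pvBTag lines m) =
        (if m = 2 then (pvBScan lines).2.2 else []) ++ (pvBScan lines).2.1 := by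
  induction lines with
  | nil => intro m; simp [pvBScan, pvBTag, pvHelpers, pvProofs]
  | cons line rest ih =>
    intro m
    simp only [pvBScan, pvBTag]
    by_cases h1 : PySem.Str.startswith (PySem.Str.strip line) "## Helper Lemmas" = true
    · have := ih 1
      simp only [h1, if_true]
      simp_all
    · by_cases h2 : PySem.Str.startswith (PySem.Str.strip line) "## Proof" = true
      · have := ih 2
        simp only [h1, h2, if_true]
        simp_all [pvHelpers, pvProofs]
      · have := ih m
        simp only [h1, h2]
        by_cases hm1 : m = 1
        · subst hm1; simp_all [pvHelpers, pvProofs]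
        · by_cases hm2 : m = 2 <;> simp_all [pvHelpers, pvProofs]

-- the flushed forward block split = B's reverse block build with leading flush
theorem pvBBlk_eq (xs : List String) : ∀ (B : List String),
    (if (pvSplitAux xs B).2 ≠ [] then
        (pvSplitAux xs B).1 ++ [PySem.Str.join "\n" (pvSplitAux xs B).2]
      else (pvSplitAux xs B).1) =
    (if B ++ (pvBBlk xs).2 ≠ [] then
        PySem.Str.join "\n" (B ++ (pvBBlk xs).2) :: (pvBBlk xs).1
      else (pvBBlk xs).1) := by
  induction xs with
  | nil => intro B; by_cases h : B = [] <;> simp [pvSplitAux, pvBBlk, h]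
  | cons ln rest ih =>
    intro B
    by_cases hs : PySem.Str.strip ln = ""
    · by_cases hB : B = []
      · simp only [pvSplitAux, pvBBlk, hs, hB]
        have := ih []
        by_cases hb : (pvBBlk rest).2 = [] <;> simp_all
      · simp only [pvSplitAux, pvBBlk, hs]
        have := ih []
        by_cases hc : (pvSplitAux rest []).2 = [] <;>
          by_cases hb : (pvBBlk rest).2 = [] <;> simp_all
    · simp only [pvSplitAux, pvBBlk]
      have := ih (B ++ [ln])
      simp_all

theorem pvAFilter_eq (xs : List String) : ∀ (pt : String) (acc : List String),
    pvAFilter xs pt acc = acc ++ xs.filter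
      (fun lm => !(PySem.Str.isIn ((pvSplitNL (PySem.Str.strip lm)).headD "") pt)) := by
  induction xs with
  | nil => intro pt acc; simp [pvAFilter]
  | cons lm rest ih =>
    intro pt acc
    simp only [pvAFilter, ih]
    split <;> rename_i h <;> simp_all

theorem pvAFindTheorem_eq (xs : List String) :
    pvAFindTheorem xs = xs.findIdx (fun ln => PySem.Str.startswith (PySem.Str.strip ln) "theorem") := by
  induction xs with
  | nil => simp [pvAFindTheorem]
  | cons ln rest ih =>
    simp only [pvAFindTheorem, List.findIdx_cons, ih]
    split <;> rename_i h <;> simp_all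

theorem pvFinal (m P : List String) (i : Nat) :
    PySem.Str.join "\n" (if m ≠ [] then P.take i ++ [""] ++ m ++ [""] ++ P.drop i else P) =
      (if m = [] then PySem.Str.join "\n" P
       else PySem.Str.join "\n" (P.take i ++ [""] ++ m ++ [""] ++ P.drop i)) := by
  by_cases h : m = [] <;> simp [h]

-- ===== VERDICT (by name: the statement is the Claim_ definition above) =====
theorem integrate_lemmas_into_proof_spec : Claim_equal_integrate_lemmas_into_proof := by
  intro text _
  unfold Spec_integrate_lemmas_into_proof integrate_lemmas_into_proof integrate_lemmas_into_proof_alt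
  have hscan := pvBScan_eq (pvSplitNL text) 0
  have h1 : pvHelpers (pvBTag (pvSplitNL text) 0) = (pvBScan (pvSplitNL text)).1 := by
    simpa using hscan.1
  have h2 : pvProofs (pvBTag (pvSplitNL text) 0) = (pvBScan (pvSplitNL text)).2.1 := by
    simpa using hscan.2
  simp only [pvALoop_eq, List.nil_append, pvMode, Bool.false_eq_true, if_false]
  rw [h1, h2, pvBBlk_eq _ [], pvAFilter_eq, pvAFindTheorem_eq]
  simp only [List.nil_append]
  rw [pvFinal]
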